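-- pv_equiv track=rewrite | github.com/20001LastOrder/adversarialcodepierce | acp/samples/java.py | get_pos_to_token_map
-- ===== SOURCE A (Python) =====
-- def get_pos_to_token_map(code_tokens, connector=" "):
--     pos_to_token_map = {}
--     pos = 0
--     for i, token in enumerate(code_tokens):
--         start = pos
--         end = pos + len(token)
--         pos_to_token_map[(start, end)] = i
--         pos = end + len(connector)
--
--     return pos_to_token_map
-- ===== SOURCE B (Python) =====
-- def get_pos_to_token_map(code_tokens, connector=" "):
--     step = len(connector)
--     starts = [0]
--     for t in code_tokens:
--         starts.append(starts[-1] + len(t) + step)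
--     return {(starts[i], starts[i] + len(code_tokens[i])): i
--             for i in range(len(code_tokens))}
-- ===== Notes on version B (the rewrite author's own statement) =====
-- stated objective: alternative
-- what changed: Replaces the single fused accumulate-and-emit loop by two passes: first a prefix table of start offsets is materialized, then the dict is built by a comprehension indexing into that table.
import Mathlib
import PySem

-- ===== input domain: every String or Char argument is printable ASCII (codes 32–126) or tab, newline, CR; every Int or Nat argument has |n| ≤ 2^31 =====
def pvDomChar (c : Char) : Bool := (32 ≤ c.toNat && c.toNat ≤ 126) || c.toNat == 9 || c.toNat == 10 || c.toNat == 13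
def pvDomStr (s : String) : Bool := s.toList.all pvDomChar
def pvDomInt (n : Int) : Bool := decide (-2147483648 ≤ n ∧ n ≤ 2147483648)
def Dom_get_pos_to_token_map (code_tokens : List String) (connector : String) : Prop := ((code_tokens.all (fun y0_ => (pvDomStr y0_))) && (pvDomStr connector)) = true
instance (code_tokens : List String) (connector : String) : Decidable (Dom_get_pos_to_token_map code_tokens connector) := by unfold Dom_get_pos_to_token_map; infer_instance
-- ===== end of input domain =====

-- B replaces A's fused accumulate-and-emit loop by two passes (a prefix table of
-- start offsets, then a dict comprehension over indices); same cost, alternative shape.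

-- ===== PORT A =====
-- A's for-loop as structural recursion over the tokens, carrying the dict, i and pos.
def pvALoop (conn : String) (toks : List String) (d : PySem.Dict (Int × Int) Int)
    (i : Int) (pos : Int) : PySem.Dict (Int × Int) Int :=
  match toks with
  | [] => d
  | t :: rest =>
      pvALoop conn rest (d.insert (pos, pos + (t.length : Int)) i) (i + 1)
        (pos + (t.length : Int) + (conn.length : Int))

def get_pos_to_token_map (code_tokens : List String) (connector : String) : List (Int × Int × Int) :=
  (pvALoop connector code_tokens PySem.Dict.empty 0 0).items.map (fun p => (p.1.1, p.1.2, p.2))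

-- ===== PORT B =====
-- Source B's starts-populating loop (starts[-1] is the carried pos accumulator).
def pvStarts (step : Int) (toks : List String) (pos : Int) : List Int :=
  match toks with
  | [] => [pos]
  | t :: rest => pos :: pvStarts step rest (pos + (t.length : Int) + step)

-- Source B's dict comprehension over range(len(code_tokens)), indexing the prefix table.
def get_pos_to_token_map_alt (code_tokens : List String) (connector : String) : List (Int × Int × Int) :=
  let st := pvStarts (connector.length : Int) code_tokens 0
  (((List.range code_tokens.length).foldl (fun d i =>
      d.insert (st.getD i 0, st.getD i 0 + ((code_tokens.getD i "").length : Int)) (i : Int))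
    PySem.Dict.empty)).items.map (fun p => (p.1.1, p.1.2, p.2))

-- ===== PRECONDITION & SPEC =====
def Spec_get_pos_to_token_map (code_tokens : List String) (connector : String) (out : List (Int × Int × Int)) : Prop := out = get_pos_to_token_map_alt code_tokens connector
instance (code_tokens : List String) (connector : String) (out : List (Int × Int × Int)) : Decidable (Spec_get_pos_to_token_map code_tokens connector out) := by unfold Spec_get_pos_to_token_map; infer_instance

-- ===== CLAIM (what is proved, stated in full; the proofs are below) =====
def Claim_equal_get_pos_to_token_map : Prop := ∀ (code_tokens : List String) (connector : String), Dom_get_pos_to_token_map code_tokens connector → Spec_get_pos_to_token_map code_tokens connector (get_pos_to_token_map code_tokens connector)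

-- ===== LEMMAS AND PROOFS =====
-- A's single loop and B's indexed fold over the prefix table insert the very same
-- key/value sequence; proved by induction on the token list, generalizing the
-- start position, the index offset and the accumulated dict.
lemma pvLoop_eq (conn : String) (toks : List String) : ∀ (d : PySem.Dict (Int × Int) Int) (k : Nat) (pos : Int),
    pvALoop conn toks d (k : Int) pos
    = (List.range toks.length).foldl (fun d i =>
        d.insert ((pvStarts (conn.length : Int) toks pos).getD i 0,
                  (pvStarts (conn.length : Int) toks pos).getD i 0 + ((toks.getD i "").length : Int))
          ((i : Int) + (k : Int))) d := by
  induction toks with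
  | nil => intro d k pos; simp [pvALoop]
  | cons t rest ih =>
      intro d k pos
      rw [pvALoop]
      have : ((k : Int) + 1) = ((k + 1 : Nat) : Int) := by push_cast; ring
      rw [this, ih]
      simp only [List.length_cons, List.range_succ_eq_map, List.foldl_cons, List.foldl_map,
        pvStarts, List.getD_cons_zero, List.getD_cons_succ, Nat.cast_zero, zero_add]
      congr 1
      funext d' i
      push_cast
      ring_nf

theorem get_pos_to_token_map_spec : Claim_equal_get_pos_to_token_map := by
  intro code_tokens connector _
  unfold Spec_get_pos_to_token_map get_pos_to_token_map get_pos_to_token_map_alt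
  have h := pvLoop_eq connector code_tokens PySem.Dict.empty 0 0
  simp only [Nat.cast_zero, add_zero] at h
  rw [h]
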